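-- pv_equiv track=rewrite | github.com/j1z0/cracking_the_code_interview_v5_python | chp17/glowforge_interview.py | count_mistakes2
-- ===== SOURCE A (Python) =====
-- def count_mistakes2(array, low, high):
--     mistakes = 0
--
--     array.sort()
--     array_len = len(array)
--     for idx,item in enumerate(array):
--         #out of range
--         if item < low or item > high:
--             mistakes += 1
--
--         #detect dups
--         elif (idx +1) < array_len:
--             if (item == array[idx + 1]):
--                 mistakes +=1
--
--     mistakes += (high - low + 1) - (array_len - mistakes)
--
--     return mistakes
-- ===== SOURCE B (Python) =====
-- def count_mistakes2(array, low, high):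
--     # one pass: collect the distinct in-range values; every other slot is a mistake,
--     # and each missing in-range value is a mistake too:
--     # result = n + (high - low + 1) - 2 * |distinct in-range values|
--     seen = set()
--     for item in array:
--         if low <= item <= high:
--             seen.add(item)
--     return len(array) + (high - low + 1) - 2 * len(seen)
-- ===== Notes on version B (the rewrite author's own statement) =====
-- stated objective: alternative
-- what changed: Replaces sort-then-adjacent-scan duplicate detection by a single pass collecting distinct in-range values into a set, returning n + (high-low+1) - 2*|distinct|; A sorts the list in place, B leaves it untouched (return value equivalence only).
import Mathlib
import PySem

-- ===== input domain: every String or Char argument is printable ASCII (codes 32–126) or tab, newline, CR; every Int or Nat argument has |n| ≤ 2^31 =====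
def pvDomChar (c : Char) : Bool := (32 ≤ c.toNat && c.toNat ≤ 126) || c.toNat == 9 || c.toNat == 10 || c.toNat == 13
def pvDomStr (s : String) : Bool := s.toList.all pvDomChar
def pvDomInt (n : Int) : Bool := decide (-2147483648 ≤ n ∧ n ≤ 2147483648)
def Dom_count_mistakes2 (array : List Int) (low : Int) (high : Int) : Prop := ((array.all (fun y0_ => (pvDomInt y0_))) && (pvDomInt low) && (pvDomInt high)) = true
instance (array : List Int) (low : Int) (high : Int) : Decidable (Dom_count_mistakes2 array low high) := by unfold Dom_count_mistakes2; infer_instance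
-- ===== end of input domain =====

-- B replaces A's sort-and-adjacent-scan by one pass over a set of distinct in-range values
-- (result = n + (high-low+1) - 2*|distinct|); A sorts the list IN PLACE, B does not mutate it:
-- the equivalence proved here is about the RETURN value only.

-- ===== PORT A =====
def count_mistakes2 (array : List Int) (low : Int) (high : Int) : Int :=
  let arr := PySem.List.sorted array (fun x => x) false
  let array_len : Int := arr.length
  let mistakes : Int := (PySem.List.enumerate arr 0).foldl
    (fun m p =>
      if p.2 < low ∨ high < p.2 then m + 1
      else if p.1 + 1 < array_len then
        if p.2 = PySem.List.pyGetD arr (p.1 + 1) 0 then m + 1 else m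
      else m) 0
  mistakes + ((high - low + 1) - (array_len - mistakes))

-- ===== PORT B =====
def count_mistakes2_alt (array : List Int) (low : Int) (high : Int) : Int :=
  let seen : PySem.Set Int := array.foldl
    (fun s item => if low ≤ item ∧ item ≤ high then PySem.Set.add s item else s)
    PySem.Set.empty
  (array.length : Int) + (high - low + 1) - 2 * (seen.length : Int)

-- ===== PRECONDITION & SPEC =====
def Spec_count_mistakes2 (array : List Int) (low : Int) (high : Int) (out : Int) : Prop := out = count_mistakes2_alt array low high
instance (array : List Int) (low : Int) (high : Int) (out : Int) : Decidable (Spec_count_mistakes2 array low high out) := by unfold Spec_count_mistakes2; infer_instance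

-- ===== CLAIM (what is proved, stated in full; the proofs are below) =====
def Claim_equal_count_mistakes2 : Prop := ∀ (array : List Int) (low : Int) (high : Int), Dom_count_mistakes2 array low high → Spec_count_mistakes2 array low high (count_mistakes2 array low high)

-- ===== LEMMAS AND PROOFS =====

/-- Adjacent-pair recursion computing what A's loop counts on a list. -/
def advCount (low high : Int) : List Int → Int
  | [] => 0
  | [x] => if x < low ∨ high < x then 1 else 0
  | x :: y :: t => (if x < low ∨ high < x then 1 else if x = y then 1 else 0)
      + advCount low high (y :: t)

/-- The in-range predicate, as Bool. -/
def inR (low high x : Int) : Bool := decide (low ≤ x ∧ x ≤ high)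

lemma foldA_eq_advCount (low high : Int) (arr : List Int) :
    ∀ (suf pre : List Int), arr = pre ++ suf → ∀ (m : Int),
    (PySem.List.enumerate suf (pre.length : Int)).foldl
      (fun m p =>
        if p.2 < low ∨ high < p.2 then m + 1
        else if p.1 + 1 < (arr.length : Int) then
          if p.2 = PySem.List.pyGetD arr (p.1 + 1) 0 then m + 1 else m
        else m) m
      = m + advCount low high suf := by
  intro suf
  induction suf with
  | nil => intro pre _ m; simp [PySem.List.enumerate_nil, advCount]
  | cons x rest ih =>
    intro pre harr m
    rw [PySem.List.enumerate_cons, List.foldl_cons]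
    have hlen : ((pre ++ [x]).length : Int) = (pre.length : Int) + 1 := by
      simp
    have harr' : arr = (pre ++ [x]) ++ rest := by simpa using harr
    have := ih (pre ++ [x]) harr'
    rw [hlen] at this
    rw [this]
    cases rest with
    | nil =>
      have hL : (arr.length : Int) = (pre.length : Int) + 1 := by
        subst harr; simp
      simp only [advCount]
      by_cases hout : x < low ∨ high < x
      · simp [hout]
        try ring
      · have hguard : ¬ ((pre.length : Int) + 1 < (arr.length : Int)) := by omega
        simp [hout, hguard]
    | cons y t =>
      have hL : (arr.length : Int) = (pre.length : Int) + 2 + t.length := by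
        subst harr; simp; ring
      have hget : PySem.List.pyGetD arr ((pre.length : Int) + 1) 0 = y := by
        have hcast : (pre.length : Int) + 1 = ((pre.length + 1 : Nat) : Int) := by push_cast; ring
        rw [hcast, PySem.List.pyGetD_natCast]
        subst harr
        have h1 : (pre ++ x :: y :: t)[pre.length + 1]? = some y := by
          rw [List.getElem?_append_right (by omega)]
          simp
        simp [List.getD_eq_getElem?_getD]
      simp only [advCount]
      by_cases hout : x < low ∨ high < x
      · simp [hout]
        try ring
      · have hguard : (pre.length : Int) + 1 < (arr.length : Int) := by omega
        by_cases hdup : x = y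
        · simp [hguard, hget, hdup]
          try ring
        · simp [hout, hguard, hget, hdup]
          try ring

lemma advCount_sorted (low high : Int) :
    ∀ (l : List Int), l.Pairwise (· ≤ ·) →
    advCount low high l = (l.length : Int) - ((l.filter (inR low high)).toFinset.card : Int) := by
  intro l
  induction l with
  | nil => intro _; simp [advCount]
  | cons x rest ih =>
    intro hp
    have hhead : ∀ z ∈ rest, x ≤ z := (List.pairwise_cons.mp hp).1
    have hrest : rest.Pairwise (· ≤ ·) := (List.pairwise_cons.mp hp).2
    cases rest with
    | nil =>
      by_cases hout : x < low ∨ high < x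
      · have : inR low high x = false := by simp [inR]; omega
        simp [advCount, hout, this]
      · have : inR low high x = true := by simp [inR]; omega
        simp [advCount, hout, this]
    | cons y t =>
      have ihy := ih hrest
      by_cases hout : x < low ∨ high < x
      · have hx : inR low high x = false := by simp [inR]; omega
        rw [show advCount low high (x :: y :: t)
            = (if x < low ∨ high < x then 1 else if x = y then 1 else 0) + advCount low high (y :: t) from rfl,
          if_pos hout, List.filter_cons_of_neg (by simp [hx]), ihy]
        simp only [List.length_cons]
        push_cast
        ring
      · have hx : inR low high x = true := by simp [inR]; omega
        by_cases hdup : x = y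
        · have hyR : inR low high y = true := hdup ▸ hx
          have hxin : x ∈ (y :: t).filter (inR low high) := by
            rw [List.mem_filter]; exact ⟨hdup ▸ List.mem_cons_self, hx⟩
          have hcard : ((x :: y :: t).filter (inR low high)).toFinset.card
              = ((y :: t).filter (inR low high)).toFinset.card := by
            rw [List.filter_cons_of_pos hx, List.toFinset_cons,
              Finset.card_insert_of_mem (List.mem_toFinset.mpr hxin)]
          rw [show advCount low high (x :: y :: t)
              = (if x < low ∨ high < x then 1 else if x = y then 1 else 0) + advCount low high (y :: t) from rfl,
            if_neg hout, if_pos hdup, ihy, hcard]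
          simp only [List.length_cons]
          push_cast
          ring
        · have hxy : x < y := lt_of_le_of_ne (hhead y List.mem_cons_self) hdup
          have hxnot : x ∉ (y :: t).filter (inR low high) := by
            intro hmem
            have hx' := List.mem_filter.mp hmem
            rcases List.mem_cons.mp hx'.1 with h | h
            · exact hdup h
            · have := (List.pairwise_cons.mp hrest).1 x h
              omega
          have hcard : ((x :: y :: t).filter (inR low high)).toFinset.card
              = ((y :: t).filter (inR low high)).toFinset.card + 1 := by
            rw [List.filter_cons_of_pos hx, List.toFinset_cons,
              Finset.card_insert_of_notMem (fun h => hxnot (List.mem_toFinset.mp h))]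
          rw [show advCount low high (x :: y :: t)
              = (if x < low ∨ high < x then 1 else if x = y then 1 else 0) + advCount low high (y :: t) from rfl,
            if_neg hout, if_neg hdup, ihy, hcard]
          simp only [List.length_cons]
          push_cast
          ring

lemma foldB_eq_ofList_filter (low high : Int) (array : List Int) :
    ∀ (s0 : PySem.Set Int),
    array.foldl (fun s item => if low ≤ item ∧ item ≤ high then PySem.Set.add s item else s) s0
      = (array.filter (inR low high)).foldl PySem.Set.add s0 := by
  induction array with
  | nil => intro s0; simp
  | cons x rest ih =>
    intro s0
    by_cases hx : low ≤ x ∧ x ≤ high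
    · have : inR low high x = true := by simp [inR, hx]
      simp [this, hx, ih]
    · have : inR low high x = false := by simp [inR]; omega
      simp [this, hx, ih]

lemma length_ofList_eq_card (l : List Int) :
    (PySem.Set.ofList l).length = l.toFinset.card := by
  have hnd : (PySem.Set.ofList l).Nodup := PySem.Set.nodup_ofList l
  have hfin : (PySem.Set.ofList l).toFinset = l.toFinset := by
    ext a; simp [PySem.Set.mem_ofList]
  rw [← List.toFinset_card_of_nodup hnd, hfin]

-- ===== VERDICT (by name: the statement is the Claim_ definition above) =====
theorem count_mistakes2_spec : Claim_equal_count_mistakes2 := by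
  intro array low high _
  unfold Spec_count_mistakes2 count_mistakes2 count_mistakes2_alt
  set arr := PySem.List.sorted array (fun x => x) false with harr
  have hperm : arr.Perm array := PySem.List.sorted_perm array (fun x => x) false
  have hlen : arr.length = array.length := hperm.length_eq
  have hpw : arr.Pairwise (· ≤ ·) := by
    have := PySem.List.sorted_pairwise (key := fun x => x) (xs := array)
    simpa [harr] using this
  have hfold := foldA_eq_advCount low high arr arr [] rfl 0
  simp only [List.length_nil, Nat.cast_zero] at hfold
  have hadv := advCount_sorted low high arr hpw
  have hB := foldB_eq_ofList_filter low high array PySem.Set.empty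
  have hofl : (array.filter (inR low high)).foldl PySem.Set.add PySem.Set.empty
      = PySem.Set.ofList (array.filter (inR low high)) :=
    (PySem.Set.ofList_eq_foldl _).symm
  have hcardeq : (arr.filter (inR low high)).toFinset = (array.filter (inR low high)).toFinset :=
    Finset.ext fun a => by simp [hperm.mem_iff]
  have hlenB : ((array.foldl (fun s item => if low ≤ item ∧ item ≤ high then PySem.Set.add s item else s) PySem.Set.empty).length : Int)
      = ((array.filter (inR low high)).toFinset.card : Int) := by
    rw [hB, hofl, length_ofList_eq_card]
  simp only [hfold, zero_add, hadv, hcardeq, hlenB]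
  push_cast [hlen]
  ring
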